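-- pv_equiv track=rewrite | github.com/aihpi/pilotproject-hearing-loss | scripts/utils/data_utils.py | filter_common_words
-- ===== SOURCE A (Python) =====
-- from typing import List
--
-- def filter_common_words(
--     word_lists: List[List[str]],
--     min_occurrences: int = None
-- ) -> List[str]:
--     """
--     Find words that appear in multiple word lists (e.g., across different conditions).
--
--     Args:
--         word_lists: List of word lists to compare
--         min_occurrences: Minimum number of lists a word must appear in
--                         (default: must appear in all lists)
--
--     Returns:
--         Sorted list of common words
--
--     Example:
--         >>> list1 = ['cat', 'dog', 'bird']
--         >>> list2 = ['cat', 'dog', 'fish']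
--         >>> list3 = ['cat', 'bird', 'fish']
--         >>> filter_common_words([list1, list2, list3], min_occurrences=2)
--         ['bird', 'cat', 'dog', 'fish']
--         >>> filter_common_words([list1, list2, list3], min_occurrences=3)
--         ['cat']
--     """
--     if not word_lists:
--         return []
--
--     if min_occurrences is None:
--         min_occurrences = len(word_lists)
--
--     # Count occurrences of each word across all lists
--     word_counts = {}
--     for word_list in word_lists:
--         for word in set(word_list):  # Use set to count each word once per list
--             word_counts[word] = word_counts.get(word, 0) + 1
--
--     # Filter by minimum occurrences
--     common_words = [
--         word for word, count in word_counts.items()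
--         if count >= min_occurrences
--     ]
--
--     return sorted(common_words)
-- ===== SOURCE B (Python) =====
-- def filter_common_words(word_lists, min_occurrences=None):
--     """Words appearing in at least min_occurrences of the lists, sorted.
--
--     Strategy: turn each list into a set once, take the union as the word
--     universe, then count each word's presence by scanning the sets."""
--     if not word_lists:
--         return []
--     if min_occurrences is None:
--         min_occurrences = len(word_lists)
--     sets = [set(wl) for wl in word_lists]
--     universe = set().union(*sets)
--     return sorted(w for w in universe
--                   if sum(1 for s in sets if w in s) >= min_occurrences)
-- ===== Notes on version B (the rewrite author's own statement) =====
-- stated objective: alternative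
-- what changed: B inverts the traversal: instead of A's single pass building a word->count dict, B materialises one set per list, takes their union as the word universe, and counts each word by membership scans over the list of sets.
import Mathlib
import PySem

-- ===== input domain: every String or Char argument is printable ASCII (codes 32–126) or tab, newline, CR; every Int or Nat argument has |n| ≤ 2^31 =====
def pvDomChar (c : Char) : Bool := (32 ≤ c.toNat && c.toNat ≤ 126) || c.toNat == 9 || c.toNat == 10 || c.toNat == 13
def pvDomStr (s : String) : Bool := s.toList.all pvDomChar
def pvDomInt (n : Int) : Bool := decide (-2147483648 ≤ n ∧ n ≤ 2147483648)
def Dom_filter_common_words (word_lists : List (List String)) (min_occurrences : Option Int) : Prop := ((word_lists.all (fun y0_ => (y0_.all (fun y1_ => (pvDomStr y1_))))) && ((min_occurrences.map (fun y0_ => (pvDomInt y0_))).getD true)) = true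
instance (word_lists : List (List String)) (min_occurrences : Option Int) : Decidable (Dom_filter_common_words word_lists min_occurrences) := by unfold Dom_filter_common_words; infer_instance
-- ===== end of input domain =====

-- B builds per-list sets, unions them into a word universe, and counts each word by
-- membership scans, instead of A's single counting pass into a dict ("alternative").

-- ===== PORT A =====
-- transliteration of A: guard, default min, dict-building double loop, comprehension, sorted
def filter_common_words (word_lists : List (List String)) (min_occurrences : Option Int) : List String :=
  if word_lists = [] then []
  else
    let m : Int := match min_occurrences with
      | none => (word_lists.length : Int)
      | some m => m
    -- word_counts[word] = word_counts.get(word, 0) + 1, over set(word_list)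
    let word_counts : PySem.Dict String Int :=
      word_lists.foldl
        (fun d word_list =>
          (PySem.Set.ofList word_list).foldl (fun d word => d.insert word (d.getD word 0 + 1)) d)
        PySem.Dict.empty
    -- [word for word, count in word_counts.items() if count >= m]
    let common_words : List String :=
      ((word_counts.items.filter (fun p => decide (m ≤ p.2))).map Prod.fst)
    PySem.List.sorted common_words (fun x => x) false

-- ===== PORT B =====
def filter_common_words_alt (word_lists : List (List String)) (min_occurrences : Option Int) : List String :=
  if word_lists = [] then []
  else
    let m : Int := match min_occurrences with
      | none => (word_lists.length : Int)
      | some m => m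
    let sets : List (PySem.Set String) := word_lists.map (fun wl => PySem.Set.ofList wl)
    -- set().union(*sets)
    let wordUniverse : PySem.Set String := sets.foldl (fun u s => PySem.Set.update u s) PySem.Set.empty
    -- sum(1 for s in sets if w in s) is the count of sets containing w (PySem.List.sum_map_ite_one_zero)
    PySem.List.sorted
      (wordUniverse.filter (fun w => decide (m ≤ (sets.countP (fun s => PySem.Set.contains s w) : Int))))
      (fun x => x) false

-- ===== PRECONDITION & SPEC =====
def Spec_filter_common_words (word_lists : List (List String)) (min_occurrences : Option Int) (out : List String) : Prop := out = filter_common_words_alt word_lists min_occurrences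
instance (word_lists : List (List String)) (min_occurrences : Option Int) (out : List String) : Decidable (Spec_filter_common_words word_lists min_occurrences out) := by unfold Spec_filter_common_words; infer_instance

-- ===== CLAIM (what is proved, stated in full; the proofs are below) =====
def Claim_equal_filter_common_words : Prop := ∀ (word_lists : List (List String)) (min_occurrences : Option Int), Dom_filter_common_words word_lists min_occurrences → Spec_filter_common_words word_lists min_occurrences (filter_common_words word_lists min_occurrences)

-- ===== LEMMAS AND PROOFS =====

-- A's counting dict: the value at w is the number of lists containing w
lemma countA (word_lists : List (List String)) (d : PySem.Dict String Int) (w : String) :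
    (word_lists.foldl
      (fun d word_list =>
        (PySem.Set.ofList word_list).foldl (fun d word => d.insert word (d.getD word 0 + 1)) d)
      d).getD w 0
    = d.getD w 0 + (word_lists.countP (fun wl => decide (w ∈ wl)) : Int) := by
  induction word_lists generalizing d with
  | nil => simp
  | cons wl rest ih =>
    simp only [List.foldl_cons, ih, PySem.Dict.getD_foldl_insert_add_one, List.countP_cons]
    have hc : (PySem.Set.ofList wl).count w = if w ∈ wl then 1 else 0 := by
      by_cases h : w ∈ wl
      · simp [h]
      · simp [h, List.count_eq_zero.mpr (fun hx => h ((PySem.Set.mem_ofList wl w).mp hx))]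
    by_cases h : w ∈ wl
    · rw [hc]; simp [h]; ring
    · rw [hc]; simp [h]

-- A's dict keys stay nodup through the double counting loop
lemma nodupKeysA (word_lists : List (List String)) (d : PySem.Dict String Int)
    (hd : d.keys.Nodup) :
    (word_lists.foldl
      (fun d word_list =>
        (PySem.Set.ofList word_list).foldl (fun d word => d.insert word (d.getD word 0 + 1)) d)
      d).keys.Nodup := by
  induction word_lists generalizing d with
  | nil => simpa
  | cons wl rest ih =>
    exact ih _ (PySem.Dict.nodup_keys_foldl_insert _ (fun d x => d.getD x 0 + 1) _ hd)

-- A's dict keys: membership = occurring in some processed list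
lemma memKeysA (word_lists : List (List String)) (d : PySem.Dict String Int) (w : String) :
    w ∈ (word_lists.foldl
      (fun d word_list =>
        (PySem.Set.ofList word_list).foldl (fun d word => d.insert word (d.getD word 0 + 1)) d)
      d).keys ↔ w ∈ d.keys ∨ ∃ wl ∈ word_lists, w ∈ wl := by
  induction word_lists generalizing d with
  | nil => simp
  | cons wl rest ih =>
    rw [List.foldl_cons, ih, PySem.Dict.keys_foldl_insert]
    constructor
    · rintro (h | ⟨l, hl, hw⟩)
      · rcases (PySem.Set.mem_update _ _ _).mp h with h' | h'
        · exact Or.inl h'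
        · exact Or.inr ⟨wl, List.mem_cons_self, (PySem.Set.mem_ofList _ _).mp h'⟩
      · exact Or.inr ⟨l, List.mem_cons_of_mem _ hl, hw⟩
    · rintro (h | ⟨l, hl, hw⟩)
      · exact Or.inl ((PySem.Set.mem_update _ _ _).mpr (Or.inl h))
      · rcases List.mem_cons.mp hl with rfl | hl'
        · exact Or.inl ((PySem.Set.mem_update _ _ _).mpr
            (Or.inr ((PySem.Set.mem_ofList _ _).mpr hw)))
        · exact Or.inr ⟨l, hl', hw⟩

-- B's universe: membership = lying in some of the sets
lemma memUniv (sets : List (PySem.Set String)) (u : PySem.Set String) (w : String) :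
    w ∈ sets.foldl (fun u s => PySem.Set.update u s) u ↔ w ∈ u ∨ ∃ s ∈ sets, w ∈ s := by
  induction sets generalizing u with
  | nil => simp
  | cons s rest ih =>
    rw [List.foldl_cons, ih]
    constructor
    · rintro (h | ⟨t, ht, hw⟩)
      · rcases (PySem.Set.mem_update _ _ _).mp h with h' | h'
        · exact Or.inl h'
        · exact Or.inr ⟨s, List.mem_cons_self, h'⟩
      · exact Or.inr ⟨t, List.mem_cons_of_mem _ ht, hw⟩
    · rintro (h | ⟨t, ht, hw⟩)
      · exact Or.inl ((PySem.Set.mem_update _ _ _).mpr (Or.inl h))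
      · rcases List.mem_cons.mp ht with rfl | ht'
        · exact Or.inl ((PySem.Set.mem_update _ _ _).mpr (Or.inr hw))
        · exact Or.inr ⟨t, ht', hw⟩

-- B's universe is nodup
lemma nodupUniv (sets : List (PySem.Set String)) (u : PySem.Set String) (hu : u.Nodup) :
    (sets.foldl (fun u s => PySem.Set.update u s) u).Nodup := by
  induction sets generalizing u with
  | nil => simpa
  | cons s rest ih => exact ih _ (PySem.Set.nodup_update _ _ hu)

-- the two bodies agree for ANY threshold m
lemma core_filter_common_words (word_lists : List (List String)) (m : Int) :
    PySem.List.sorted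
      ((((word_lists.foldl
          (fun d word_list =>
            (PySem.Set.ofList word_list).foldl (fun d word => d.insert word (d.getD word 0 + 1)) d)
          (PySem.Dict.empty : PySem.Dict String Int)).items.filter
            (fun p => decide (m ≤ p.2))).map Prod.fst)) (fun x => x) false
    = PySem.List.sorted
        (((word_lists.map (fun wl => PySem.Set.ofList wl)).foldl
            (fun u s => PySem.Set.update u s) PySem.Set.empty).filter
          (fun w => decide (m ≤ ((word_lists.map (fun wl => PySem.Set.ofList wl)).countP
            (fun s => PySem.Set.contains s w) : Int)))) (fun x => x) false := by
  have hnd :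
      (word_lists.foldl
        (fun d word_list =>
          (PySem.Set.ofList word_list).foldl (fun d word => d.insert word (d.getD word 0 + 1)) d)
        (PySem.Dict.empty : PySem.Dict String Int)).keys.Nodup :=
    nodupKeysA _ _ (by simp)
  set D := word_lists.foldl
      (fun d word_list =>
        (PySem.Set.ofList word_list).foldl (fun d word => d.insert word (d.getD word 0 + 1)) d)
      (PySem.Dict.empty : PySem.Dict String Int) with hD
  set sets := word_lists.map (fun wl => PySem.Set.ofList wl) with hsets
  have hA : ((D.items.filter (fun p => decide (m ≤ p.2))).map Prod.fst)
      = D.keys.filter (fun w => decide (m ≤ D.getD w 0)) := by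
    rw [PySem.Dict.items_eq_map_keys D hnd 0, List.filter_map, List.map_map]
    simp [Function.comp_def]
  have hcnt : ∀ w : String,
      D.getD w 0 = (sets.countP (fun s => PySem.Set.contains s w) : Int) := by
    intro w
    rw [hD, countA]
    simp only [PySem.Dict.getD_empty, zero_add, hsets, List.countP_map, Nat.cast_inj]
    refine List.countP_congr (fun wl _ => ?_)
    simp [Function.comp, PySem.Set.mem_ofList]
  have hperm : (D.keys.filter (fun w => decide (m ≤ D.getD w 0))).Perm
      ((sets.foldl (fun u s => PySem.Set.update u s) PySem.Set.empty).filter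
        (fun w => decide (m ≤ (sets.countP (fun s => PySem.Set.contains s w) : Int)))) := by
    rw [List.perm_ext_iff_of_nodup (hnd.filter _) ((nodupUniv _ _ (by simp)).filter _)]
    intro w
    simp only [List.mem_filter, hcnt]
    constructor
    · rintro ⟨hk, hge⟩
      refine ⟨?_, hge⟩
      rcases (memKeysA _ _ _).mp (hD ▸ hk) with h | ⟨wl, hwl, hw⟩
      · simp at h
      · exact (memUniv _ _ _).mpr (Or.inr ⟨PySem.Set.ofList wl,
          hsets ▸ List.mem_map_of_mem hwl, (PySem.Set.mem_ofList _ _).mpr hw⟩)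
    · rintro ⟨hu, hge⟩
      refine ⟨?_, hge⟩
      rcases (memUniv _ _ _).mp hu with h | ⟨s, hs, hw⟩
      · simp [PySem.Set.empty] at h
      · rcases List.mem_map.mp (hsets ▸ hs) with ⟨wl, hwl, rfl⟩
        exact hD ▸ (memKeysA _ _ _).mpr (Or.inr ⟨wl, hwl, (PySem.Set.mem_ofList _ _).mp hw⟩)
  rw [hA]
  exact PySem.List.sorted_eq_sorted_of_perm _ _ _ (fun a b h => h) hperm

-- ===== VERDICT (by name: the statement is the Claim_ definition above) =====
theorem filter_common_words_spec : Claim_equal_filter_common_words := by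
  intro word_lists min_occurrences _
  unfold Spec_filter_common_words filter_common_words filter_common_words_alt
  by_cases hnil : word_lists = []
  · simp [hnil]
  · simp only [hnil, ite_false]
    cases min_occurrences with
    | none => exact core_filter_common_words word_lists _
    | some m => exact core_filter_common_words word_lists m
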